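-- pv_equiv track=rewrite | github.com/m2nsp/GoldRush | 조하은/0108_01.py | solution
-- ===== SOURCE A (Python) =====
-- def solution(N, K, arr):
--     answer = 0
--     for i in range(N):
--         if arr[i] == 'P':
--             # 앞뒤로 K만큼 떨어진 거리에서 먹을 수 있는 햄버거가 있는지 탐색
--             for j in range(i-K, i+K+1):
--                 if j < 0 or j >= N:
--                     continue
--                 if arr[j] == 'H':
--                     arr[j] = 0 # 햄버거를 먹으면 0으로 바꿈
--                     answer += 1
--                     break
--     return answer
-- ===== SOURCE B (Python) =====
-- def solution(N, K, arr):
--     # Two-pointer greedy over P/H positions; does not mutate arr (A does); same return value.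
--     ps = [i for i in range(N) if arr[i] == 'P']
--     hs = [i for i in range(N) if arr[i] == 'H']
--     h = 0
--     answer = 0
--     for p in ps:
--         while h < len(hs) and hs[h] < p - K:
--             h += 1
--         if h < len(hs) and hs[h] <= p + K:
--             answer += 1
--             h += 1
--     return answer
-- ===== Notes on version B (the rewrite author's own statement) =====
-- stated objective: alternative
-- what changed: Replaced the per-P rescan of the whole [i-K,i+K] window over the mutated array by one pass: collect P and H positions once and match them greedily with a single monotone pointer over the H positions.
import Mathlib
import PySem

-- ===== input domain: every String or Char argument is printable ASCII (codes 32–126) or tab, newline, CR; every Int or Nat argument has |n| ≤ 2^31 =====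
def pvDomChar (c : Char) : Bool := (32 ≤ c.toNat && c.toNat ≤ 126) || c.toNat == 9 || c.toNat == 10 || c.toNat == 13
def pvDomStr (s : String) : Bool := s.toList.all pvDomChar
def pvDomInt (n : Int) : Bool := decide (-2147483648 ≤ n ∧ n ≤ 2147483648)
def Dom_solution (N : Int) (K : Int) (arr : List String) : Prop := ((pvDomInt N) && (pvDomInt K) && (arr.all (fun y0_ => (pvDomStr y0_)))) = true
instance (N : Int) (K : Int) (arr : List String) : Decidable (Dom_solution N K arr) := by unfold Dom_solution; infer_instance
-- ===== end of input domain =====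

-- B replaces A's per-'P' rescan of the [i-K,i+K] window over the mutated array with a
-- single monotone pointer over the 'H' positions (objective: alternative). A mutates arr
-- in place (eaten 'H' cells become 0); B does not — the equivalence proved here is about
-- the RETURN value only.

-- ===== PORT A =====
-- Python writes the int 0 into an eaten cell; the port writes the string "0".
-- This is exact for the return value: overwritten cells are only ever compared
-- against "P"/"H" afterwards, and both 0 and "0" fail those comparisons.
def innerA (N : Int) (arr : List String) : List Int → Option (List String)
  | [] => none
  | j :: js =>
    if j < 0 ∨ N ≤ j then innerA N arr js
    else if PySem.List.pyGet? arr j = some "H" then some (arr.set j.toNat "0")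
    else innerA N arr js

def stepA (N K : Int) (st : List String × Int) (i : Int) : List String × Int :=
  if PySem.List.pyGet? st.1 i = some "P" then
    match innerA N st.1 (PySem.List.pyRange (i - K) (i + K + 1) 1) with
    | some arr' => (arr', st.2 + 1)
    | none => st
  else st

def solution (N : Int) (K : Int) (arr : List String) : Int :=
  ((PySem.List.pyRange 0 N 1).foldl (stepA N K) (arr, 0)).2

-- ===== PORT B =====
-- while h < len(hs) and hs[h] < p - K: h += 1
def advB (hs : List Int) (bound : Int) (h : Nat) : Nat :=
  if _hlt : h < hs.length then
    if hs.getD h 0 < bound then advB hs bound (h + 1) else h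
  else h
termination_by hs.length - h
decreasing_by omega

def stepB (K : Int) (hs : List Int) (st : Nat × Int) (p : Int) : Nat × Int :=
  let h := advB hs (p - K) st.1
  if h < hs.length ∧ hs.getD h 0 ≤ p + K then (h + 1, st.2 + 1) else (h, st.2)

def solution_alt (N : Int) (K : Int) (arr : List String) : Int :=
  let ps := (PySem.List.pyRange 0 N 1).filter (fun i => PySem.List.pyGet? arr i == some "P")
  let hs := (PySem.List.pyRange 0 N 1).filter (fun j => PySem.List.pyGet? arr j == some "H")
  (ps.foldl (stepB K hs) (0, 0)).2

-- ===== PRECONDITION & SPEC =====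
-- Python A raises IndexError (at arr[i]) exactly when N > len(arr); nothing else raises.
def Pre_solution (N : Int) (K : Int) (arr : List String) : Prop := N ≤ (arr.length : Int)
instance (N : Int) (K : Int) (arr : List String) : Decidable (Pre_solution N K arr) := by unfold Pre_solution; infer_instance
def pvWitness_solution : Int × Int × List String := (3, 1, ["P", "x", "H"])

def Spec_solution (N : Int) (K : Int) (arr : List String) (out : Int) : Prop := out = solution_alt N K arr
instance (N : Int) (K : Int) (arr : List String) (out : Int) : Decidable (Spec_solution N K arr out) := by unfold Spec_solution; infer_instance

-- ===== CLAIM (what is proved, stated in full; the proofs are below) =====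
def Claim_equal_solution : Prop := ∀ (N : Int) (K : Int) (arr : List String), Dom_solution N K arr → Pre_solution N K arr → Spec_solution N K arr (solution N K arr)

-- ===== LEMMAS AND PROOFS =====

-- P positions of arr in [a,b) and still-uneaten H positions in [0,N)
def psOf (arr : List String) (a b : Int) : List Int :=
  (PySem.List.pyRange a b 1).filter (fun i => PySem.List.pyGet? arr i == some "P")
def hsOf (arr : List String) (N : Int) : List Int :=
  (PySem.List.pyRange 0 N 1).filter (fun j => PySem.List.pyGet? arr j == some "H")

-- abstract form of A's greedy: eat the first available H in the window, remove it
def gA (K : Int) : List Int → List Int → Int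
  | [], _ => 0
  | p :: ps, hs =>
    match hs.find? (fun x => decide (p - K ≤ x ∧ x ≤ p + K)) with
    | some x => 1 + gA K ps (hs.erase x)
    | none => gA K ps hs

-- abstract form of B's two-pointer greedy: drop Hs left of the window for good
def gB (K : Int) : List Int → List Int → Int
  | [], _ => 0
  | p :: ps, hs =>
    match hs.dropWhile (fun x => decide (x < p - K)) with
    | [] => gB K ps []
    | x :: t => if x ≤ p + K then 1 + gB K ps t else gB K ps (x :: t)

lemma pyGet?_set_self (arr : List String) (x : Int) (v : String) (h0 : 0 ≤ x)
    (hlt : x.toNat < arr.length) :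
    PySem.List.pyGet? (arr.set x.toNat v) x = some v := by
  rw [PySem.List.pyGet?_of_nonneg _ h0]
  simp [hlt]

lemma pyGet?_set_ne (arr : List String) (x j : Int) (v : String) (h0 : 0 ≤ x) (hj : 0 ≤ j)
    (hne : j ≠ x) : PySem.List.pyGet? (arr.set x.toNat v) j = PySem.List.pyGet? arr j := by
  rw [PySem.List.pyGet?_of_nonneg _ hj, PySem.List.pyGet?_of_nonneg _ hj]
  have : x.toNat ≠ j.toNat := by omega
  simp [this]

lemma lt_length_of_pyGet? (arr : List String) (x : Int) (s : String) (h0 : 0 ≤ x)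
    (h : PySem.List.pyGet? arr x = some s) : x.toNat < arr.length := by
  rw [PySem.List.pyGet?_of_nonneg _ h0] at h
  exact (List.getElem?_eq_some_iff.mp h).1

lemma hsOf_pairwise (arr : List String) (N : Int) : (hsOf arr N).Pairwise (· < ·) := by
  exact List.Pairwise.filter _ (PySem.List.pairwise_lt_pyRange_one 0 N)

lemma psOf_pairwise (arr : List String) (a b : Int) : (psOf arr a b).Pairwise (· < ·) := by
  exact List.Pairwise.filter _ (PySem.List.pairwise_lt_pyRange_one a b)

lemma hsOf_nodup (arr : List String) (N : Int) : (hsOf arr N).Nodup := by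
  exact (hsOf_pairwise arr N).imp (fun h => ne_of_lt h)

lemma find?_eq_some_iff_min {l : List Int} {p : Int → Bool} {x : Int}
    (hl : l.Pairwise (· < ·)) :
    l.find? p = some x ↔ (x ∈ l ∧ p x = true ∧ ∀ y ∈ l, p y = true → x ≤ y) := by
  induction l with
  | nil => simp
  | cons a l ih =>
    have hpl := (List.pairwise_cons.mp hl).2
    have halt := (List.pairwise_cons.mp hl).1
    by_cases hpa : p a = true
    · simp only [List.find?_cons_of_pos hpa, Option.some_inj]
      constructor
      · rintro rfl
        refine ⟨List.mem_cons_self, hpa, ?_⟩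
        rintro y hy _
        rcases List.mem_cons.mp hy with rfl | hy
        · exact le_refl _
        · exact le_of_lt (halt y hy)
      · rintro ⟨hmem, hpx, hmin⟩
        rcases List.mem_cons.mp hmem with rfl | hx
        · rfl
        · have := hmin a List.mem_cons_self hpa
          have := halt x hx
          omega
    · rw [List.find?_cons_of_neg (by simpa using hpa), ih hpl]
      constructor
      · rintro ⟨hmem, hpx, hmin⟩
        refine ⟨List.mem_cons_of_mem _ hmem, hpx, ?_⟩
        rintro y hy hpy
        rcases List.mem_cons.mp hy with rfl | hy
        · simp [hpa] at hpy
        · exact hmin y hy hpy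
      · rintro ⟨hmem, hpx, hmin⟩
        rcases List.mem_cons.mp hmem with rfl | hx
        · simp [hpa] at hpx
        · exact ⟨hx, hpx, fun y hy hpy => hmin y (List.mem_cons_of_mem _ hy) hpy⟩

lemma find?_min_eq {l₁ l₂ : List Int} {p₁ p₂ : Int → Bool}
    (h₁ : l₁.Pairwise (· < ·)) (h₂ : l₂.Pairwise (· < ·))
    (hiff : ∀ x, (x ∈ l₁ ∧ p₁ x = true) ↔ (x ∈ l₂ ∧ p₂ x = true)) :
    l₁.find? p₁ = l₂.find? p₂ := by
  cases hf : l₁.find? p₁ with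
  | some x =>
    obtain ⟨hmem, hpx, hmin⟩ := (find?_eq_some_iff_min h₁).mp hf
    refine ((find?_eq_some_iff_min h₂).mpr ?_).symm
    obtain ⟨hmem₂, hpx₂⟩ := (hiff x).mp ⟨hmem, hpx⟩
    refine ⟨hmem₂, hpx₂, fun y hy hpy => ?_⟩
    obtain ⟨hy₁, hpy₁⟩ := (hiff y).mpr ⟨hy, hpy⟩
    exact hmin y hy₁ hpy₁
  | none =>
    symm
    rw [List.find?_eq_none] at hf ⊢
    intro y hy hpy
    obtain ⟨hy₁, hpy₁⟩ := (hiff y).mpr ⟨hy, hpy⟩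
    exact hf y hy₁ hpy₁

lemma innerA_find (N : Int) (arr : List String) (L : List Int) :
    innerA N arr L =
      (L.find? (fun j => (decide (0 ≤ j) && decide (j < N)) && (PySem.List.pyGet? arr j == some "H"))).map
        (fun j => arr.set j.toNat "0") := by
  induction L with
  | nil => simp [innerA]
  | cons j js ih =>
    by_cases hb : j < 0 ∨ N ≤ j
    · have hf : ((decide (0 ≤ j) && decide (j < N)) && (PySem.List.pyGet? arr j == some "H")) = false := by
        rcases hb with hb | hb <;> simp [hb]
      rw [List.find?_cons_of_neg (by simp [hf])]
      simp only [innerA]; rw [if_pos hb]; exact ih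
    · by_cases hH : PySem.List.pyGet? arr j = some "H"
      · have hf : ((decide (0 ≤ j) && decide (j < N)) && (PySem.List.pyGet? arr j == some "H")) = true := by
          simp [hH]; omega
        rw [List.find?_cons_of_pos (p := fun j => (decide (0 ≤ j) && decide (j < N)) && (PySem.List.pyGet? arr j == some "H")) (l := js) hf]
        simp only [innerA]; rw [if_neg hb, if_pos hH]; rfl
      · have hf : ((decide (0 ≤ j) && decide (j < N)) && (PySem.List.pyGet? arr j == some "H")) = false := by
          simp [hH]
        rw [List.find?_cons_of_neg (by simp [hf])]
        simp only [innerA]; rw [if_neg hb, if_neg hH]; exact ih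

lemma innerA_eq (N K : Int) (arr : List String) (i : Int) :
    innerA N arr (PySem.List.pyRange (i - K) (i + K + 1) 1) =
      ((hsOf arr N).find? (fun x => decide (i - K ≤ x ∧ x ≤ i + K))).map
        (fun x => arr.set x.toNat "0") := by
  rw [innerA_find]
  congr 1
  refine find?_min_eq (PySem.List.pairwise_lt_pyRange_one _ _) (hsOf_pairwise arr N) ?_
  intro x
  simp only [PySem.List.mem_pyRange_one, hsOf, List.mem_filter, Bool.and_eq_true,
    decide_eq_true_eq, beq_iff_eq]
  constructor
  · rintro ⟨⟨h1, h2⟩, ⟨h3, h4⟩, h5⟩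
    exact ⟨⟨⟨h3, h4⟩, h5⟩, h1, by omega⟩
  · rintro ⟨⟨⟨h3, h4⟩, h5⟩, h1, h2⟩
    exact ⟨⟨h1, by omega⟩, ⟨h3, h4⟩, h5⟩

lemma hsOf_set (arr : List String) (N x : Int) (h0 : 0 ≤ x)
    (hx : PySem.List.pyGet? arr x = some "H") :
    hsOf (arr.set x.toNat "0") N = (hsOf arr N).erase x := by
  have hlen := lt_length_of_pyGet? arr x "H" h0 hx
  rw [(hsOf_nodup arr N).erase_eq_filter, hsOf, hsOf, List.filter_filter]
  refine List.filter_congr ?_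
  intro j hj
  have hj0 : 0 ≤ j := (PySem.List.mem_pyRange_one.mp hj).1
  by_cases hjx : j = x
  · subst hjx
    rw [pyGet?_set_self arr j "0" h0 hlen]
    simp
  · rw [pyGet?_set_ne arr x j "0" h0 hj0 hjx]
    simp [hjx]

lemma psOf_set (arr : List String) (a b x : Int) (ha : 0 ≤ a) (h0 : 0 ≤ x)
    (hx : PySem.List.pyGet? arr x = some "H") :
    psOf (arr.set x.toNat "0") a b = psOf arr a b := by
  have hlen := lt_length_of_pyGet? arr x "H" h0 hx
  refine List.filter_congr ?_
  intro j hj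
  have hj0 : 0 ≤ j := le_trans ha (PySem.List.mem_pyRange_one.mp hj).1
  by_cases hjx : j = x
  · subst hjx
    rw [pyGet?_set_self arr j "0" h0 hlen, hx]
    simp
  · rw [pyGet?_set_ne arr x j "0" h0 hj0 hjx]

lemma outerA (N K : Int) : ∀ (n : Nat) (i : Int) (arr : List String) (ans : Int),
    0 ≤ i → (N - i).toNat = n →
    ((PySem.List.pyRange i N 1).foldl (stepA N K) (arr, ans)).2
      = ans + gA K (psOf arr i N) (hsOf arr N) := by
  intro n
  induction n with
  | zero =>
    intro i arr ans hi hn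
    have hNi : N ≤ i := by omega
    rw [PySem.List.pyRange_one_eq_nil hNi]
    simp [psOf, PySem.List.pyRange_one_eq_nil hNi, gA]
  | succ n ih =>
    intro i arr ans hi hn
    have hiN : i < N := by omega
    rw [PySem.List.pyRange_one_cons hiN, List.foldl_cons]
    have hps : psOf arr i N =
        if PySem.List.pyGet? arr i == some "P" then i :: psOf arr (i + 1) N
        else psOf arr (i + 1) N := by
      rw [psOf, PySem.List.pyRange_one_cons hiN, List.filter_cons]
      rfl
    by_cases hP : PySem.List.pyGet? arr i = some "P"
    · simp only [stepA, if_pos hP]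
      rw [innerA_eq N K arr i]
      cases hf : (hsOf arr N).find? (fun x => decide (i - K ≤ x ∧ x ≤ i + K)) with
      | none =>
        simp only [Option.map_none]
        rw [ih (i + 1) arr ans (by omega) (by omega)]
        rw [hps, if_pos (by simp [hP])]
        simp only [gA]
        rw [hf]
      | some x =>
        simp only [Option.map_some]
        have hxmem := List.mem_of_find?_eq_some hf
        have hxH : PySem.List.pyGet? arr x = some "H" := by
          simp only [hsOf, List.mem_filter, beq_iff_eq] at hxmem
          exact hxmem.2
        have hx0 : 0 ≤ x := by
          simp only [hsOf, List.mem_filter, PySem.List.mem_pyRange_one] at hxmem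
          exact hxmem.1.1
        rw [ih (i + 1) _ (ans + 1) (by omega) (by omega)]
        rw [psOf_set arr (i + 1) N x (by omega) hx0 hxH, hsOf_set arr N x hx0 hxH]
        rw [hps, if_pos (by simp [hP])]
        simp only [gA]
        rw [hf]
        ring
    · simp only [stepA, if_neg hP]
      rw [ih (i + 1) arr ans (by omega) (by omega)]
      rw [hps, if_neg (by simp [hP])]

lemma gA_eq_gB (K : Int) : ∀ (ps pre hs : List Int),
    (pre ++ hs).Pairwise (· < ·) → ps.Pairwise (· < ·) →
    (∀ x ∈ pre, ∀ p ∈ ps, x < p - K) →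
    gA K ps (pre ++ hs) = gB K ps hs := by
  intro ps
  induction ps with
  | nil => intro pre hs _ _ _; simp [gA, gB]
  | cons p ps ih =>
    intro pre hs hsort hps hpre
    have hp_lt : ∀ p' ∈ ps, p < p' := (List.pairwise_cons.mp hps).1
    have hps' : ps.Pairwise (· < ·) := (List.pairwise_cons.mp hps).2
    have hwd : hs.takeWhile (fun x => decide (x < p - K)) ++ hs.dropWhile (fun x => decide (x < p - K)) = hs :=
      List.takeWhile_append_dropWhile
    have hlt_pre : ∀ x ∈ pre ++ hs.takeWhile (fun x => decide (x < p - K)), x < p - K := by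
      intro x hx
      rcases List.mem_append.mp hx with hx | hx
      · exact hpre x hx p List.mem_cons_self
      · have := List.mem_takeWhile_imp hx
        simpa using this
    have hfind_pre : (pre ++ hs.takeWhile (fun x => decide (x < p - K))).find?
        (fun x => decide (p - K ≤ x ∧ x ≤ p + K)) = none := by
      rw [List.find?_eq_none]
      intro x hx
      have := hlt_pre x hx
      simp
      omega
    have hnew : ∀ x ∈ pre ++ hs.takeWhile (fun x => decide (x < p - K)), ∀ p' ∈ ps, x < p' - K := by
      intro x hx p' hp'
      have h1 := hlt_pre x hx
      have h2 := hp_lt p' hp'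
      omega
    have hsplit : pre ++ hs = (pre ++ hs.takeWhile (fun x => decide (x < p - K))) ++ hs.dropWhile (fun x => decide (x < p - K)) := by
      rw [List.append_assoc, hwd]
    have hsort' : ((pre ++ hs.takeWhile (fun x => decide (x < p - K))) ++ hs.dropWhile (fun x => decide (x < p - K))).Pairwise (· < ·) := by
      rw [← hsplit]; exact hsort
    simp only [gA, gB]
    rw [hsplit, List.find?_append, hfind_pre, Option.none_or]
    cases hd : hs.dropWhile (fun x => decide (x < p - K)) with
    | nil =>
      rw [hd] at hsort'
      simp only [List.find?_nil]
      have := ih (pre ++ hs.takeWhile (fun x => decide (x < p - K))) [] (by simpa using hsort') hps' hnew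
      simpa using this
    | cons x t =>
      rw [hd] at hsort'
      have hne : hs.dropWhile (fun x => decide (x < p - K)) ≠ [] := by rw [hd]; simp
      have hhead := List.head_dropWhile_not (fun x => decide (x < p - K)) hne
      simp only [hd, List.head_cons] at hhead
      have hxlb' : p - K ≤ x := by simpa using hhead
      by_cases hxK : x ≤ p + K
      · have hfind_d : (x :: t).find? (fun y => decide (p - K ≤ y ∧ y ≤ p + K)) = some x :=
          List.find?_cons_of_pos (by simp; omega)
        simp only [hfind_d, if_pos hxK]
        have hnotmem : x ∉ pre ++ hs.takeWhile (fun x => decide (x < p - K)) := fun hmem => by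
          have := hlt_pre x hmem; omega
        rw [List.erase_append_right _ hnotmem, List.erase_cons_head]
        have hsub : ((pre ++ hs.takeWhile (fun x => decide (x < p - K))) ++ t).Pairwise (· < ·) :=
          List.Pairwise.sublist (List.Sublist.append_left (List.sublist_cons_self x t) _) hsort'
        rw [ih (pre ++ hs.takeWhile (fun x => decide (x < p - K))) t hsub hps' hnew]
      · have hfind_d : (x :: t).find? (fun y => decide (p - K ≤ y ∧ y ≤ p + K)) = none := by
          rw [List.find?_eq_none]
          intro y hy
          have hxt : (x :: t).Pairwise (· < ·) :=
            List.Pairwise.sublist (List.sublist_append_right _ (x :: t)) hsort'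
          rcases List.mem_cons.mp hy with rfl | hy
          · simp; omega
          · have := (List.pairwise_cons.mp hxt).1 y hy
            simp; omega
        simp only [hfind_d, if_neg hxK]
        exact ih (pre ++ hs.takeWhile (fun x => decide (x < p - K))) (x :: t) hsort' hps' hnew

lemma advB_drop (hs : List Int) (b : Int) : ∀ (n : Nat) (h : Nat), hs.length - h = n →
    hs.drop (advB hs b h) = (hs.drop h).dropWhile (fun x => decide (x < b)) := by
  intro n
  induction n with
  | zero =>
    intro h hn
    have hge : hs.length ≤ h := by omega
    rw [advB]
    rw [dif_neg (by omega)]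
    rw [List.drop_eq_nil_iff.mpr hge]
    simp
  | succ n ih =>
    intro h hn
    have hlt : h < hs.length := by omega
    have hdrop : hs.drop h = hs[h] :: hs.drop (h + 1) := List.drop_eq_getElem_cons hlt
    have hgetD : hs.getD h 0 = hs[h] := List.getD_eq_getElem hs 0 hlt
    rw [advB, dif_pos hlt]
    by_cases hb2 : hs.getD h 0 < b
    · rw [if_pos hb2, ih (h + 1) (by omega), hdrop, List.dropWhile_cons]
      rw [hgetD] at hb2
      simp [hb2]
    · rw [if_neg hb2, hdrop, List.dropWhile_cons]
      rw [hgetD] at hb2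
      simp [hb2]

lemma foldB (K : Int) (hs : List Int) : ∀ (ps : List Int) (h : Nat) (ans : Int),
    (ps.foldl (stepB K hs) (h, ans)).2 = ans + gB K ps (hs.drop h) := by
  intro ps
  induction ps with
  | nil => intro h ans; simp [gB]
  | cons p ps ih =>
    intro h ans
    rw [List.foldl_cons]
    have hd := advB_drop hs (p - K) (hs.length - h) h rfl
    simp only [stepB]
    cases hcase : hs.drop (advB hs (p - K) h) with
    | nil =>
      have hge : hs.length ≤ advB hs (p - K) h := List.drop_eq_nil_iff.mp hcase
      rw [if_neg (by omega), ih, hcase]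
      rw [hcase] at hd
      simp only [gB]
      rw [← hd]
    | cons x t =>
      have hlt : advB hs (p - K) h < hs.length := by
        have := congrArg List.length hcase
        simp [List.length_drop] at this
        omega
      have hdrop : hs.drop (advB hs (p - K) h) = hs[advB hs (p - K) h] :: hs.drop (advB hs (p - K) h + 1) :=
        List.drop_eq_getElem_cons hlt
      rw [hcase] at hdrop
      obtain ⟨hx, ht⟩ := List.cons.inj hdrop
      have hgetD : hs.getD (advB hs (p - K) h) 0 = x := by
        rw [List.getD_eq_getElem hs 0 hlt, ← hx]
      rw [hcase] at hd
      by_cases hK : x ≤ p + K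
      · rw [if_pos ⟨hlt, by rw [hgetD]; exact hK⟩, ih, ← ht]
        have hgb : gB K (p :: ps) (hs.drop h) = 1 + gB K ps t := by
          simp only [gB]
          rw [← hd]
          simp [hK]
        rw [hgb]; ring
      · rw [if_neg (fun hc => hK (by rw [hgetD] at hc; exact hc.2)), ih, hcase]
        have hgb : gB K (p :: ps) (hs.drop h) = gB K ps (x :: t) := by
          simp only [gB]
          rw [← hd]
          simp [hK]
        rw [hgb]

-- ===== VERDICT (by name: the statement is the Claim_ definition above) =====
theorem solution_spec : Claim_equal_solution := by
  intro N K arr _ _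
  unfold Spec_solution
  have hA : solution N K arr = 0 + gA K (psOf arr 0 N) (hsOf arr N) :=
    outerA N K (N - 0).toNat 0 arr 0 le_rfl rfl
  have hB : solution_alt N K arr = 0 + gB K (psOf arr 0 N) ((hsOf arr N).drop 0) := by
    simpa [solution_alt, psOf, hsOf] using foldB K (hsOf arr N) (psOf arr 0 N) 0 0
  rw [hA, hB, List.drop_zero]
  have := gA_eq_gB K (psOf arr 0 N) [] (hsOf arr N)
    (by simpa using hsOf_pairwise arr N) (psOf_pairwise arr 0 N) (by simp)
  simpa using this
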